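-- pv_equiv track=rewrite | github.com/wladimir-kirienko/leetcode | Maximum Score After Splitting a String/solution.py | maxScore2
-- ===== SOURCE A (Python) =====
-- def maxScore2(s: str) -> int:
--     """ Count Left Zeros and Right Ones time: O(n) space: O(1) """
--     ans = 0
--     ones = s.count('1')
--     zeros = 0
--     for i in range(len(s) - 1):
--         if s[i] == '1':
--             ones -= 1
--         else:
--             zeros += 1
--         ans = max(ans, zeros + ones)
--     return ans
-- ===== SOURCE B (Python) =====
-- def maxScore2(s: str) -> int:
--     return max((i - s[:i].count('1') + s[i:].count('1') for i in range(1, len(s))),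
--                default=0)
-- ===== Notes on version B (the rewrite author's own statement) =====
-- stated objective: simpler
-- what changed: Replaced the one-pass running-counter loop by a direct max over all split points, recomputing each split score from slice counts (left score = prefix length minus its ones count, since A treats every non-one character as a zero).
import Mathlib
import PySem

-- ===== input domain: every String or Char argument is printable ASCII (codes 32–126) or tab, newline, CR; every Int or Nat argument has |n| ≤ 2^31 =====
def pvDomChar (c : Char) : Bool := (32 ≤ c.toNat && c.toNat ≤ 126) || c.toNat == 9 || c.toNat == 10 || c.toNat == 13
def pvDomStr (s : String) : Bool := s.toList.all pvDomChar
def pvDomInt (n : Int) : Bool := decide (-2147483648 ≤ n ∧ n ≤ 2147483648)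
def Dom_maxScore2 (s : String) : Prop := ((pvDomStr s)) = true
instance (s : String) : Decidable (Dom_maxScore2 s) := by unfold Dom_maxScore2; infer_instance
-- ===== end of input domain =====

-- B replaces A's single-pass running-counter loop by a direct max over all splits, recomputing each
-- split's score with slice counts (left score = prefix length minus its ones count, since A treats every non-one char as a zero).


-- ===== PORT A =====
-- one loop iteration on the state (ans, ones, zeros): A's if/else, then ans = max(ans, zeros + ones)
def pvStepA (st : Int × Int × Int) (c : Char) : Int × Int × Int :=
  let p := if c == '1' then (st.2.1 - 1, st.2.2) else (st.2.1, st.2.2 + 1)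
  (max st.1 (p.2 + p.1), p.1, p.2)

def maxScore2 (s : String) : Int :=
  let ones : Int := (PySem.Str.count s "1" : Int)
  -- for i in range(len(s) - 1): … s[i] …   (i is always in range here, so pyGetD is exact)
  ((PySem.List.pyRange 0 (PySem.Str.len s - 1) 1).foldl
      (fun st i => pvStepA st (PySem.List.pyGetD s.toList i ' ')) (0, ones, 0)).1

-- ===== PORT B =====
-- max((i - s[:i].count('1') + s[i:].count('1') for i in range(1, len(s))), default=0)
def maxScore2_alt (s : String) : Int :=
  PySem.List.maxD
    ((PySem.List.pyRange 1 (PySem.Str.len s) 1).map (fun i =>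
      i - (PySem.Str.count (PySem.Str.slice s none (some i)) "1" : Int)
        + (PySem.Str.count (PySem.Str.slice s (some i) none) "1" : Int)))
    (fun x => x) 0

-- ===== PRECONDITION & SPEC =====
def Spec_maxScore2 (s : String) (out : Int) : Prop := out = maxScore2_alt s
instance (s : String) (out : Int) : Decidable (Spec_maxScore2 s out) := by unfold Spec_maxScore2; infer_instance

-- ===== CLAIM (what is proved, stated in full; the proofs are below) =====
def Claim_equal_maxScore2 : Prop := ∀ (s : String), Dom_maxScore2 s → Spec_maxScore2 s (maxScore2 s)

-- ===== LEMMAS AND PROOFS =====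

-- counting the single-character pattern [c] is counting the character c
lemma count_go_singleton (c : Char) (l : List Char) (fuel acc : Nat) (h : l.length ≤ fuel) :
    PySem.Chars.count.go [c] fuel l acc = acc + l.count c := by
  induction l generalizing fuel acc with
  | nil => cases fuel <;> simp [PySem.Chars.count.go]
  | cons x t ih =>
      cases fuel with
      | zero => simp at h
      | succ m =>
          simp only [PySem.Chars.count.go, List.isPrefixOf, List.length_singleton]
          by_cases hx : c = x
          · subst hx
            simp only [BEq.rfl, Bool.true_and]
            rw [List.drop_one, List.tail_cons, ih m (acc + 1) (by simpa using h)]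
            simp
            omega
          · have hb : (c == x) = false := by simp [hx]
            simp only [hb, Bool.false_and, Bool.false_eq_true]
            rw [ih m acc (by simpa using h)]
            simp [Ne.symm hx]

lemma count_one_char (l : List Char) (c : Char) :
    PySem.Chars.count l [c] = l.count c := by
  simp only [PySem.Chars.count, List.isEmpty_cons, Bool.false_eq_true, if_false]
  simpa using count_go_singleton c l l.length 0 le_rfl

-- A's loop invariant: folding pvStepA over l yields the running max of the per-prefix values
lemma foldA_eq (l : List Char) (ans o z : Int) :
    (l.foldl pvStepA (ans, o, z)).1
      = ((List.range l.length).map (fun (j : Nat) => z + o + ((j : Int) + 1)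
            - 2 * ((l.take (j + 1)).count '1' : Int))).foldl max ans := by
  induction l generalizing ans o z with
  | nil => simp
  | cons c t ih =>
      have hrange : List.range (t.length + 1) = 0 :: List.map Nat.succ (List.range t.length) :=
        List.range_succ_eq_map
      by_cases hc : c = '1'
      · subst hc
        simp only [List.foldl_cons, pvStepA, BEq.rfl, if_true]
        rw [ih, List.length_cons, hrange]
        simp only [List.map_cons, List.map_map, List.foldl_cons]
        congr 1
        · simp
          omega
        · apply List.map_congr_left
          intro j _
          simp [List.take_succ_cons, Function.comp]
          omega
      · have hc' : (c == '1') = false := by simp [hc]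
        simp only [List.foldl_cons, pvStepA, hc', Bool.false_eq_true, if_false]
        rw [ih, List.length_cons, hrange]
        simp only [List.map_cons, List.map_map, List.foldl_cons]
        congr 1
        · simp [hc]
          omega
        · apply List.map_congr_left
          intro j _
          simp [List.take_succ_cons, Function.comp, hc]
          omega

-- the common normal form both ports reduce to
def pvVals (s : String) : List Int :=
  (List.range (s.toList.length - 1)).map (fun (j : Nat) =>
    ((s.toList.count '1' : Int) + ((j : Int) + 1)
      - 2 * ((s.toList.take (j + 1)).count '1' : Int)))

lemma A_norm (s : String) : maxScore2 s = (pvVals s).foldl max 0 := by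
  unfold maxScore2 pvVals
  dsimp only
  rw [PySem.Str.count_eq, PySem.Str.len_eq]
  have h1 : ("1" : String).toList = ['1'] := rfl
  rw [h1, count_one_char]
  rcases hcs : s.toList with _ | ⟨c, t⟩
  · rw [PySem.List.pyRange_one_eq_nil (by simp)]
    simp
  · have hgd : ∀ (acc : Int × Int × Int),
        ∀ i ∈ PySem.List.pyRange 0 ((c :: t).dropLast.length : Int) 1,
        pvStepA acc (PySem.List.pyGetD (c :: t) i ' ')
          = pvStepA acc (PySem.List.pyGetD (c :: t).dropLast i ' ') := by
      intro acc i hi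
      rw [PySem.List.mem_pyRange_one] at hi
      have hlt : i < ((c :: t).length : Int) := by
        have h2 := hi.2
        simp only [List.length_dropLast, List.length_cons] at h2 ⊢
        push_cast at h2 ⊢
        omega
      rw [PySem.List.pyGetD_eq_getElem _ _ hi.1 hlt,
          PySem.List.pyGetD_eq_getElem _ _ hi.1 hi.2,
          List.getElem_dropLast]
    have hlen : ((c :: t).length : Int) - 1 = ((c :: t).dropLast.length : Int) := by simp
    rw [hlen, PySem.List.foldl_congr_mem _ _ _ _ hgd,
        PySem.List.foldl_pyRange_zero_pyGetD' (c :: t).dropLast ' ' pvStepA,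
        foldA_eq]
    have hl1 : (c :: t).dropLast.length = t.length := by simp
    have hl2 : (c :: t).length - 1 = t.length := by simp
    rw [hl1, hl2]
    congr 1
    apply List.map_congr_left
    intro j hj
    have hj' : j < t.length := List.mem_range.mp hj
    rw [List.dropLast_eq_take, List.take_take]
    have hmin : min (j + 1) ((c :: t).length - 1) = j + 1 := by
      simp only [List.length_cons]
      omega
    rw [hmin]
    omega

lemma B_norm (s : String) :
    maxScore2_alt s = PySem.List.maxD (pvVals s) (fun x => x) 0 := by
  unfold maxScore2_alt pvVals
  rw [PySem.Str.len_eq, PySem.List.pyRange_one]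
  have ht : ((s.toList.length : Int) - 1).toNat = s.toList.length - 1 := by omega
  rw [ht, List.map_map]
  congr 1
  apply List.map_congr_left
  intro k hk
  have hk' : k < s.toList.length - 1 := List.mem_range.mp hk
  have hi : ((1 : Int) + (k : Int)).toNat = k + 1 := by omega
  have h1 : ("1" : String).toList = ['1'] := rfl
  simp only [Function.comp_apply, PySem.Str.count_eq, PySem.Str.slice, String.toList_ofList,
    PySem.Chars.slice, h1, count_one_char]
  have hsl1 : PySem.List.slice s.toList none (some (1 + (k : Int)))
      = List.take ((1 + (k : Int)).toNat) s.toList := PySem.List.slice_to _ (by omega)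
  have hsl2 : PySem.List.slice s.toList (some (1 + (k : Int)))
      = List.drop ((1 + (k : Int)).toNat) s.toList := PySem.List.slice_from _ (by omega)
  rw [hsl1, hsl2, hi]
  have hsplit : (s.toList.take (k + 1)).count '1' + (s.toList.drop (k + 1)).count '1'
      = s.toList.count '1' := by
    rw [← List.count_append, List.take_append_drop]
  omega

lemma main_eq (s : String) : maxScore2 s = maxScore2_alt s := by
  rw [A_norm, B_norm]
  unfold pvVals
  rcases hn : s.toList.length - 1 with _ | m
  · simp [PySem.List.maxD, PySem.List.max?]
  · rw [List.range_succ_eq_map]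
    simp only [List.map_cons]
    rw [PySem.List.maxD_id_cons, List.foldl_cons]
    congr 1
    have h1 : (s.toList.take (0 + 1)).count '1' ≤ (s.toList.take (0 + 1)).length :=
      List.count_le_length
    have h2 : (s.toList.take (0 + 1)).length ≤ 1 := by simp
    have h3 : (s.toList.take (0 + 1)).count '1' ≤ s.toList.count '1' :=
      List.Sublist.count_le '1' (List.take_sublist _ _)
    apply max_eq_right
    omega

-- ===== VERDICT (by name: the statement is the Claim_ definition above) =====
theorem maxScore2_spec : Claim_equal_maxScore2 := by
  intro s _
  exact main_eq s
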